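-- pv_equiv track=rewrite | github.com/rosalindpan/hcrpaper | code/scripts/trim-enriched-regions.py | trim_region
-- ===== SOURCE A (Python) =====
-- def trim_region(seq, target_list):
--     n_lefttrim, n_righttrim = 0, 0
--     for AA in seq:
--         if AA not in target_list:
--             n_lefttrim += 1
--         else:
--             break
--     for AA in seq[::-1]:
--         if AA not in target_list:
--             n_righttrim += 1
--         else:
--             break
--     trimmed_seq = seq[n_lefttrim:(len(seq) - n_righttrim)]
--     return trimmed_seq, n_lefttrim, n_righttrim
-- ===== SOURCE B (Python) =====
-- def trim_region(seq, target_list):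
--     n = len(seq)
--     first = None
--     last = None
--     for i, ch in enumerate(seq):
--         if ch in target_list:
--             if first is None:
--                 first = i
--             last = i
--     if first is None:
--         n_lefttrim, n_righttrim = n, n
--     else:
--         n_lefttrim, n_righttrim = first, n - 1 - last
--     return seq[n_lefttrim:(n - n_righttrim)], n_lefttrim, n_righttrim
-- ===== Notes on version B (the rewrite author's own statement) =====
-- stated objective: alternative
-- what changed: Replaced A's two opposite-direction break-loops (forward and over seq[::-1]) by a single enumerate pass that records the first and last index whose character is in target_list, from which both trim counts and the slice are computed.
import Mathlib
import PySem

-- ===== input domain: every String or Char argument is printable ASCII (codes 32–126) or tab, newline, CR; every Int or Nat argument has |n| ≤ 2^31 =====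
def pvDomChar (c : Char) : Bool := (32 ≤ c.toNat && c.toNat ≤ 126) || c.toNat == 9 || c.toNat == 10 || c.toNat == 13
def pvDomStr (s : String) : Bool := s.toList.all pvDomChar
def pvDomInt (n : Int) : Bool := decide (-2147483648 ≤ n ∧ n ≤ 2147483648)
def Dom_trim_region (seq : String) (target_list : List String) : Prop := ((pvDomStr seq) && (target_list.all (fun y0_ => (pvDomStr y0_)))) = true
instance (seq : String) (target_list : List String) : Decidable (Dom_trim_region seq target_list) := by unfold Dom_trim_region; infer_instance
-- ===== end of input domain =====

-- B replaces A's two opposite-direction break-loops by one enumerate pass tracking the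
-- first and last in-target index (objective: alternative decomposition, same cost).

-- ===== PORT A =====
-- 'AA in target_list': AA is a one-character string tested against the list of strings
def pvInTargets (c : Char) (tl : List String) : Bool := tl.contains (String.ofList [c])

-- A's break-loop: count leading characters until the first one in target_list (all of them if none)
def pvPrefixCount (cs : List Char) (tl : List String) : Nat :=
  match cs with
  | [] => 0
  | c :: rest => if pvInTargets c tl then 0 else pvPrefixCount rest tl + 1

-- seq[::-1] in the second loop is reversal (PySem.Str.slice?_none_none_neg_one)
def trim_region (seq : String) (target_list : List String) : String × Int × Int :=
  (String.ofList (PySem.List.slice seq.toList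
      (some ((pvPrefixCount seq.toList target_list : Nat) : Int))
      (some ((seq.toList.length : Int) - ((pvPrefixCount seq.toList.reverse target_list : Nat) : Int)))),
   ((pvPrefixCount seq.toList target_list : Nat) : Int),
   ((pvPrefixCount seq.toList.reverse target_list : Nat) : Int))

-- ===== PORT B =====
-- B's single 'for i, ch in enumerate(seq)' loop, carrying (first, last) match indices
def pvScan (cs : List Char) (tl : List String) (i : Nat)
    (first : Option Nat) (last : Option Nat) : Option Nat × Option Nat :=
  match cs with
  | [] => (first, last)
  | c :: rest =>
    if pvInTargets c tl then
      pvScan rest tl (i + 1) (if first.isNone then some i else first) (some i)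
    else
      pvScan rest tl (i + 1) first last

-- B's post-loop branch: (n_lefttrim, n_righttrim) from the scan result
def pvCounts (cs : List Char) (tl : List String) : Nat × Nat :=
  match pvScan cs tl 0 none none with
  | (none, _) => (cs.length, cs.length)
  | (some f, lastOpt) => (f, cs.length - 1 - lastOpt.getD 0)  -- lastOpt is some whenever first is

def trim_region_alt (seq : String) (target_list : List String) : String × Int × Int :=
  (String.ofList (PySem.List.slice seq.toList
      (some (((pvCounts seq.toList target_list).1 : Nat) : Int))
      (some ((seq.toList.length : Int) - (((pvCounts seq.toList target_list).2 : Nat) : Int)))),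
   (((pvCounts seq.toList target_list).1 : Nat) : Int),
   (((pvCounts seq.toList target_list).2 : Nat) : Int))

-- ===== PRECONDITION & SPEC =====
def Spec_trim_region (seq : String) (target_list : List String) (out : String × Int × Int) : Prop := out = trim_region_alt seq target_list
instance (seq : String) (target_list : List String) (out : String × Int × Int) : Decidable (Spec_trim_region seq target_list out) := by unfold Spec_trim_region; infer_instance

-- ===== CLAIM (what is proved, stated in full; the proofs are below) =====
def Claim_equal_trim_region : Prop := ∀ (seq : String) (target_list : List String), Dom_trim_region seq target_list → Spec_trim_region seq target_list (trim_region seq target_list)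

-- ===== LEMMAS AND PROOFS =====

theorem pvPrefixCount_le (cs : List Char) (tl : List String) :
    pvPrefixCount cs tl ≤ cs.length := by
  induction cs with
  | nil => simp [pvPrefixCount]
  | cons c rest ih =>
    simp only [pvPrefixCount, List.length_cons]
    split <;> omega

theorem pvPrefixCount_eq_length_iff (cs : List Char) (tl : List String) :
    pvPrefixCount cs tl = cs.length ↔ ∀ c ∈ cs, pvInTargets c tl = false := by
  induction cs with
  | nil => simp [pvPrefixCount]
  | cons c rest ih =>
    simp only [pvPrefixCount, List.length_cons, List.mem_cons]
    have := pvPrefixCount_le rest tl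
    by_cases h : pvInTargets c tl
    · simp [h]
    · rw [if_neg h]
      constructor
      · intro he
        have hr : pvPrefixCount rest tl = rest.length := by omega
        intro x hx
        rcases hx with rfl | hx
        · simpa using h
        · exact ih.mp hr x hx
      · intro hall
        have : pvPrefixCount rest tl = rest.length := ih.mpr (fun x hx => hall x (Or.inr hx))
        omega

theorem pvScan_fst_some (cs : List Char) (tl : List String) (i a : Nat) (last : Option Nat) :
    (pvScan cs tl i (some a) last).1 = some a := by
  induction cs generalizing i last with
  | nil => rfl
  | cons c rest ih =>
    simp only [pvScan]
    split <;> simp [ih]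

theorem pvScan_fst_none (cs : List Char) (tl : List String) (i : Nat) (last : Option Nat) :
    (pvScan cs tl i none last).1 =
      if pvPrefixCount cs tl = cs.length then none else some (i + pvPrefixCount cs tl) := by
  induction cs generalizing i last with
  | nil => rfl
  | cons c rest ih =>
    simp only [pvScan, pvPrefixCount, List.length_cons]
    have hle := pvPrefixCount_le rest tl
    by_cases h : pvInTargets c tl
    · simp [h, pvScan_fst_some]
    · rw [if_neg h, if_neg h, ih]
      by_cases he : pvPrefixCount rest tl = rest.length
      · rw [if_pos he, if_pos (show pvPrefixCount rest tl + 1 = rest.length + 1 by omega)]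
      · rw [if_neg he,
          if_neg (show ¬ (pvPrefixCount rest tl + 1 = rest.length + 1) by omega)]
        congr 1
        omega

theorem pvScan_append (xs ys : List Char) (tl : List String) (i : Nat)
    (f l : Option Nat) :
    pvScan (xs ++ ys) tl i f l =
      pvScan ys tl (i + xs.length) (pvScan xs tl i f l).1 (pvScan xs tl i f l).2 := by
  induction xs generalizing i f l with
  | nil => simp [pvScan]
  | cons c rest ih =>
    simp only [List.cons_append, pvScan, List.length_cons]
    have harith : i + (rest.length + 1) = (i + 1) + rest.length := by omega
    split <;> rw [ih, harith]

theorem pvScan_snd (cs : List Char) (tl : List String) :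
    (pvScan cs tl 0 none none).2 =
      if pvPrefixCount cs.reverse tl = cs.length then none
      else some (cs.length - 1 - pvPrefixCount cs.reverse tl) := by
  induction cs using List.reverseRecOn with
  | nil => rfl
  | append_singleton ds c ih =>
    rw [pvScan_append]
    simp only [List.reverse_append, List.reverse_cons, List.reverse_nil, List.nil_append,
      List.cons_append, List.length_append, List.length_cons, List.length_nil, pvPrefixCount]
    have hle := pvPrefixCount_le ds.reverse tl
    rw [List.length_reverse] at hle
    by_cases h : pvInTargets c tl
    · simp only [pvScan, h, if_true]
      rw [if_neg (show ¬ ((0 : Nat) = ds.length + (0 + 1)) by omega)]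
      simp
    · simp only [pvScan, h, ih, Bool.false_eq_true, if_false]
      split_ifs with h1 h2 h2
      · rfl
      · exfalso; omega
      · exfalso; omega
      · exact congrArg some (by omega)

-- the (n_lefttrim, n_righttrim) pair of B's scan equals A's two break-loop counts
theorem counts_eq (cs : List Char) (tl : List String) :
    pvCounts cs tl = (pvPrefixCount cs tl, pvPrefixCount cs.reverse tl) := by
  have h1 := pvScan_fst_none cs tl 0 none
  have h2 := pvScan_snd cs tl
  have hF := pvPrefixCount_le cs tl
  have hR := pvPrefixCount_le cs.reverse tl
  rw [List.length_reverse] at hR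
  have hiff : pvPrefixCount cs tl = cs.length ↔ pvPrefixCount cs.reverse tl = cs.length := by
    rw [pvPrefixCount_eq_length_iff,
        show cs.length = cs.reverse.length by simp,
        pvPrefixCount_eq_length_iff]
    constructor <;> intro h x hx
    · exact h x (List.mem_reverse.mp hx)
    · exact h x (by simpa using hx)
  unfold pvCounts
  by_cases hF' : pvPrefixCount cs tl = cs.length
  · have hR' := hiff.mp hF'
    rw [if_pos hF'] at h1
    rw [show pvScan cs tl 0 none none = (none, (pvScan cs tl 0 none none).2) from
      Prod.ext h1 rfl]
    simp [hF', hR']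
  · have hR' : ¬ pvPrefixCount cs.reverse tl = cs.length := fun h => hF' (hiff.mpr h)
    rw [if_neg hF'] at h1
    rw [if_neg hR'] at h2
    rw [show pvScan cs tl 0 none none =
        (some (0 + pvPrefixCount cs tl), some (cs.length - 1 - pvPrefixCount cs.reverse tl)) from
      Prod.ext h1 h2]
    simp only [Option.getD_some, Prod.mk.injEq]
    constructor
    · omega
    · omega

-- ===== VERDICT (by name: the statement is the Claim_ definition above) =====
theorem trim_region_spec : Claim_equal_trim_region := by
  intro seq target_list _
  unfold Spec_trim_region trim_region trim_region_alt
  rw [counts_eq]
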